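-- pv_equiv track=rewrite | github.com/arnaudmkonan/pdapt | pdapt_lib/machine_learning/nlp.py | find_sentence_end
-- ===== SOURCE A (Python) =====
-- def sentence_terminator(c):
--     """ check if character is a standard sentence terminator
--     Input: character c
--     Output: True if c is in terminator list, otherwise False
--
--     >>> sentence_terminator("_")
--     False
--     >>> sentence_terminator(".")
--     True
--     """
--     terminators = ['.','!','?']
--     return c in terminators
--
-- def find_sentence_end(s):
--     """ get zero-indexed end position of first sentence in string
--     Input: text string s
--     Output: index of first end of sentence in string
--
--     NB so far sentence termination is indicated with a terminator
--        followed by an end of string, or by a space and capital letter.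
--        This code can thus handle simple acronyms.
--
--     >>> find_sentence_end("I'm here.")
--     8
--     >>> find_sentence_end("I'm a U.S. sentence. Me too! And me?")
--     19
--     """
--     for i, character in enumerate(s):
--         if i == (len(s) - 1):
--             if sentence_terminator(character):
--                 return i
--         else:
--             if i < (len(s) - 2):
--                 if sentence_terminator(character) and s[i+1] == ' ' and s[i+2].isupper():
--                     return i
--     return None
-- ===== SOURCE B (Python) =====
-- def find_sentence_end(s):
--     """Jump terminator-to-terminator with str.find instead of testing every char."""
--     n = len(s)
--     i = 0
--     while True:
--         hits = [j for j in (s.find('.', i), s.find('!', i), s.find('?', i)) if j != -1]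
--         if not hits:
--             return None
--         j = min(hits)
--         if j == n - 1:
--             return j
--         if j + 2 < n and s[j + 1] == ' ' and s[j + 2].isupper():
--             return j
--         i = j + 1
-- ===== Notes on version B (the rewrite author's own statement) =====
-- stated objective: faster
-- what changed: A scans every character with enumerate and tests each one against the terminator list; B keeps a cursor and jumps directly from one terminator to the next via the minimum of three str.find calls, applying the same end-of-string / space-plus-uppercase test only at terminator positions.
import Mathlib
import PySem

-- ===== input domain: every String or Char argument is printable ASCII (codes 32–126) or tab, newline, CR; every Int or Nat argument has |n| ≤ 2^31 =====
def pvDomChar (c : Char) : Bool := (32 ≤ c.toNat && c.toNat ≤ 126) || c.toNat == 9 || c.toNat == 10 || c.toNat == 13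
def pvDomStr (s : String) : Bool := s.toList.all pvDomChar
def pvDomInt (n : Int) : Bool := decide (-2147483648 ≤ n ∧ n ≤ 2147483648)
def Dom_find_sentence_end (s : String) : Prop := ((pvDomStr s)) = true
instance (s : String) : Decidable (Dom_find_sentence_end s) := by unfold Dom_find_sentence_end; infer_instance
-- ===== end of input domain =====

-- B replaces A's per-character scan by a cursor loop that jumps from terminator to
-- terminator via str.find (objective: faster by a constant factor, as measured; same behaviour).

-- ===== PORT A =====
-- helper sentence_terminator: c in ['.','!','?']
def sentTerm (c : Char) : Bool := ['.', '!', '?'].contains c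

-- the for-loop over enumerate(s) as index recursion; s[i+1]/s[i+2] are guarded in range
-- by `i < n - 2`, so getD never takes its default.
def aGo (full : List Char) (n i : Nat) : Option Int :=
  if h : i < n then
    -- `character` of the enumerate loop, inlined: full.getD i ' '
    if i = n - 1 then
      if sentTerm (full.getD i ' ') then some (i : Int) else aGo full n (i + 1)
    else
      if i < n - 2 ∧ sentTerm (full.getD i ' ') ∧ full.getD (i + 1) ' ' = ' ' ∧
          PySem.Chars.isupper (full.getD (i + 2) ' ') then some (i : Int)
      else aGo full n (i + 1)
  else none
termination_by n - i

def find_sentence_end (s : String) : Option Int :=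
  aGo s.toList s.toList.length 0

-- ===== PORT B =====
-- min of the non-(-1) results of s.find('.',i), s.find('!',i), s.find('?',i);
-- Int.toNat is value-preserving here since every kept find result is a valid index ≥ 0.
def bNext (full : List Char) (i : Nat) : Option Nat :=
  PySem.List.min?
    (([PySem.Chars.findFrom full ['.'] (i : Int),
       PySem.Chars.findFrom full ['!'] (i : Int),
       PySem.Chars.findFrom full ['?'] (i : Int)].filter (· ≠ -1)).map Int.toNat)
    id

theorem bNext_ge (full : List Char) (i : Nat) (hin : i ≤ full.length) {j : Nat}
    (h : bNext full i = some j) : i ≤ j := by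
  have hm := PySem.List.min?_mem h
  simp only [List.mem_map, List.mem_filter, List.mem_cons, List.mem_singleton] at hm
  obtain ⟨x, ⟨hx, hne⟩, rfl⟩ := hm
  have : (i : Int) ≤ x := by
    rcases hx with rfl | rfl | rfl | h'
    · exact (PySem.Chars.findFrom_natCast_spec full ['.'] i hin (by simpa using hne)).1
    · exact (PySem.Chars.findFrom_natCast_spec full ['!'] i hin (by simpa using hne)).1
    · exact (PySem.Chars.findFrom_natCast_spec full ['?'] i hin (by simpa using hne)).1
    · cases h'
  omega

-- the `while True` loop as recursion on the cursor; the `i ≤ n` test is only a totality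
-- guard (always true along the loop: it starts at 0 and moves to j+1 with j < n).
def bGo (full : List Char) (n i : Nat) : Option Int :=
  if hin : i ≤ full.length then
    match h : bNext full i with
    | none => none
    | some j =>
      if j = n - 1 then some (j : Int)
      else if j + 2 < n ∧ full.getD (j + 1) ' ' = ' ' ∧
          PySem.Chars.isupper (full.getD (j + 2) ' ') then some (j : Int)
      else bGo full n (j + 1)
  else none
termination_by full.length + 1 - i
decreasing_by
  have := bNext_ge full i hin h
  omega

def find_sentence_end_alt (s : String) : Option Int :=
  bGo s.toList s.toList.length 0

-- ===== PRECONDITION & SPEC =====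
def Spec_find_sentence_end (s : String) (out : Option Int) : Prop := out = find_sentence_end_alt s
instance (s : String) (out : Option Int) : Decidable (Spec_find_sentence_end s out) := by unfold Spec_find_sentence_end; infer_instance

-- ===== CLAIM (what is proved, stated in full; the proofs are below) =====
def Claim_equal_find_sentence_end : Prop := ∀ (s : String), Dom_find_sentence_end s → Spec_find_sentence_end s (find_sentence_end s)

-- ===== LEMMAS AND PROOFS =====

theorem singleton_prefix_drop {c : Char} {l : List Char} {j : Nat} :
    [c] <+: l.drop j ↔ l[j]? = some c := by
  rw [← List.head?_drop]
  cases h : l.drop j with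
  | nil => simp
  | cons a t => simp [List.cons_prefix_cons, eq_comm]

theorem term_iff (c : Char) : sentTerm c = true ↔ c = '.' ∨ c = '!' ∨ c = '?' := by
  simp [sentTerm]

-- characterisation of bNext: the first terminator position ≥ i
theorem bNext_none_spec (full : List Char) (i : Nat) (hin : i ≤ full.length)
    (h : bNext full i = none) : ∀ k, i ≤ k → k < full.length → sentTerm (full.getD k ' ') = false := by
  intro k hik hk
  rw [bNext, PySem.List.min?_eq_none_iff, List.map_eq_nil_iff, List.filter_eq_nil_iff] at h
  by_contra hterm
  have hterm' : full.getD k ' ' = '.' ∨ full.getD k ' ' = '!' ∨ full.getD k ' ' = '?' := by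
    refine (term_iff _).1 ?_
    revert hterm; cases sentTerm (full.getD k ' ') <;> simp
  have hocc : [full.getD k ' '] <:+: full.drop i := by
    have hpre : [full.getD k ' '] <+: full.drop k := by
      rw [singleton_prefix_drop, List.getD_eq_getElem?_getD, List.getElem?_eq_getElem hk]; simp
    have hsuf : full.drop k <:+ full.drop i := by
      have hdd : full.drop k = (full.drop i).drop (k - i) := by
        rw [List.drop_drop]; congr 1; omega
      rw [hdd]; exact List.drop_suffix _ _
    exact hpre.isInfix.trans hsuf.isInfix
  rcases hterm' with hc | hc | hc <;> rw [hc] at hocc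
  · have := h (PySem.Chars.findFrom full ['.'] (i : Int)) (by simp)
    rw [show (¬decide (PySem.Chars.findFrom full ['.'] (i : Int) ≠ -1) = true ↔
        PySem.Chars.findFrom full ['.'] (i : Int) = -1) from by simp] at this
    rw [PySem.Chars.findFrom_natCast_eq_neg_one_iff full ['.'] i hin] at this
    exact this hocc
  · have := h (PySem.Chars.findFrom full ['!'] (i : Int)) (by simp)
    rw [show (¬decide (PySem.Chars.findFrom full ['!'] (i : Int) ≠ -1) = true ↔
        PySem.Chars.findFrom full ['!'] (i : Int) = -1) from by simp] at this
    rw [PySem.Chars.findFrom_natCast_eq_neg_one_iff full ['!'] i hin] at this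
    exact this hocc
  · have := h (PySem.Chars.findFrom full ['?'] (i : Int)) (by simp)
    rw [show (¬decide (PySem.Chars.findFrom full ['?'] (i : Int) ≠ -1) = true ↔
        PySem.Chars.findFrom full ['?'] (i : Int) = -1) from by simp] at this
    rw [PySem.Chars.findFrom_natCast_eq_neg_one_iff full ['?'] i hin] at this
    exact this hocc

theorem occ_findFrom (full : List Char) (i k : Nat) (hin : i ≤ full.length)
    (hk : k < full.length) (hik : i ≤ k) {c : Char} (hc : full.getD k ' ' = c) :
    PySem.Chars.findFrom full [c] (i : Int) ≠ -1 ∧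
      (PySem.Chars.findFrom full [c] (i : Int)).toNat ≤ k := by
  have hpre : [c] <+: full.drop k := by
    rw [singleton_prefix_drop, List.getElem?_eq_getElem hk]
    rw [List.getD_eq_getElem?_getD, List.getElem?_eq_getElem hk] at hc
    simpa using hc
  have hocc : [c] <:+: full.drop i := by
    have hdd : full.drop k = (full.drop i).drop (k - i) := by
      rw [List.drop_drop]; congr 1; omega
    have hsuf : full.drop k <:+ full.drop i := by rw [hdd]; exact List.drop_suffix _ _
    exact hpre.isInfix.trans hsuf.isInfix
  have hne : PySem.Chars.findFrom full [c] (i : Int) ≠ -1 := by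
    rw [Ne, PySem.Chars.findFrom_natCast_eq_neg_one_iff full [c] i hin]
    exact not_not_intro hocc
  refine ⟨hne, ?_⟩
  obtain ⟨-, -, hmin⟩ := PySem.Chars.findFrom_natCast_spec full [c] i hin hne
  by_contra hlt
  exact hmin k hik (by omega) hpre

theorem bNext_some_spec (full : List Char) (i : Nat) (hin : i ≤ full.length) {j : Nat}
    (h : bNext full i = some j) :
    i ≤ j ∧ j < full.length ∧ sentTerm (full.getD j ' ') = true ∧
      ∀ k, i ≤ k → k < j → sentTerm (full.getD k ' ') = false := by
  have hmem := PySem.List.min?_mem h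
  have hmin := PySem.List.min?_isMin h
  simp only [List.mem_map, List.mem_filter, List.mem_cons, List.not_mem_nil, or_false] at hmem
  obtain ⟨x, ⟨hx, hne⟩, hxj⟩ := hmem
  have hne' : x ≠ -1 := by simpa using hne
  -- facts about the chosen find result x
  have hspec : (i : Int) ≤ x ∧ ∃ c, [c] <+: full.drop x.toNat ∧ (c = '.' ∨ c = '!' ∨ c = '?') := by
    rcases hx with rfl | rfl | rfl
    · obtain ⟨h1, h2, -⟩ := PySem.Chars.findFrom_natCast_spec full ['.'] i hin hne'
      exact ⟨h1, '.', h2, Or.inl rfl⟩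
    · obtain ⟨h1, h2, -⟩ := PySem.Chars.findFrom_natCast_spec full ['!'] i hin hne'
      exact ⟨h1, '!', h2, Or.inr (Or.inl rfl)⟩
    · obtain ⟨h1, h2, -⟩ := PySem.Chars.findFrom_natCast_spec full ['?'] i hin hne'
      exact ⟨h1, '?', h2, Or.inr (Or.inr rfl)⟩
  obtain ⟨hix, c, hpre, hcs⟩ := hspec
  have hij : i ≤ j := by omega
  have hjn : j < full.length := by
    rcases hpre with ⟨t, ht⟩
    have : full.drop x.toNat ≠ [] := by intro hnil; rw [hnil] at ht; simp at ht
    by_contra hge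
    rw [List.drop_eq_nil_of_le (by omega)] at this
    exact this rfl
  have hgetj : full.getD j ' ' = c := by
    rw [singleton_prefix_drop] at hpre
    rw [← hxj, List.getD_eq_getElem?_getD, hpre]; rfl
  refine ⟨hij, hjn, by rw [term_iff, hgetj]; exact hcs, ?_⟩
  intro k hik hkj
  by_contra hterm
  have hterm' : full.getD k ' ' = '.' ∨ full.getD k ' ' = '!' ∨ full.getD k ' ' = '?' := by
    refine (term_iff _).1 ?_
    revert hterm; cases sentTerm (full.getD k ' ') <;> simp
  have hkn : k < full.length := by omega
  have ⟨hne2, hle2⟩ := occ_findFrom full i k hin hkn hik rfl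
  have hmem2 : (PySem.Chars.findFrom full [full.getD k ' '] (i : Int)).toNat ∈
      (([PySem.Chars.findFrom full ['.'] (i : Int),
         PySem.Chars.findFrom full ['!'] (i : Int),
         PySem.Chars.findFrom full ['?'] (i : Int)].filter (· ≠ -1)).map Int.toNat) := by
    simp only [List.mem_map, List.mem_filter, List.mem_cons, List.not_mem_nil, or_false]
    refine ⟨PySem.Chars.findFrom full [full.getD k ' '] (i : Int), ⟨?_, by simpa using hne2⟩, rfl⟩
    rcases hterm' with hc | hc | hc <;> rw [hc] <;> simp
  have := hmin _ hmem2
  simp only [id] at this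
  omega

-- skip lemma: A's loop passes over non-terminator positions unchanged
theorem aGo_step (full : List Char) (n i : Nat) (hi : i < n)
    (hterm : sentTerm (full.getD i ' ') = false) :
    aGo full n i = aGo full n (i + 1) := by
  rw [aGo, dif_pos hi]
  by_cases hin1 : i = n - 1
  · rw [if_pos hin1, if_neg (by rw [hterm]; simp)]
  · rw [if_neg hin1, if_neg (by rintro ⟨-, h2, -⟩; rw [hterm] at h2; cases h2)]

theorem aGo_skip (full : List Char) (n : Nat) :
    ∀ d i j, j - i = d → i ≤ j → j ≤ n →
    (∀ k, i ≤ k → k < j → sentTerm (full.getD k ' ') = false) →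
    aGo full n i = aGo full n j := by
  intro d
  induction d with
  | zero =>
    intro i j hd hij _ _
    have h : i = j := by omega
    subst h
    rfl
  | succ d ih =>
    intro i j hd hij hjn hno
    have hi : i < j := by omega
    rw [aGo_step full n i (by omega) (hno i le_rfl hi)]
    exact ih (i + 1) j (by omega) (by omega) hjn (fun k hk1 hk2 => hno k (by omega) hk2)

theorem aGo_end (full : List Char) (n : Nat) : aGo full n n = none := by
  rw [aGo]; simp

theorem main_eq_aux (full : List Char) :
    ∀ m i, full.length + 1 - i ≤ m → i ≤ full.length →
      aGo full full.length i = bGo full full.length i := by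
  intro m
  induction m with
  | zero => intro i h1 h2; omega
  | succ m ih =>
    intro i hm hin
    rw [bGo, dif_pos hin]
    split
    next hb =>
      have hno := bNext_none_spec full i hin hb
      rw [aGo_skip full full.length (full.length - i) i full.length rfl hin le_rfl hno,
        aGo_end]
    next j hb =>
      obtain ⟨hij, hjn, hterm, hno⟩ := bNext_some_spec full i hin hb
      rw [aGo_skip full full.length (j - i) i j rfl hij (by omega) hno,
        aGo, dif_pos hjn]
      by_cases hj1 : j = full.length - 1
      · rw [if_pos hj1, if_pos hterm, if_pos hj1]
      · have hcond : (j < full.length - 2 ∧ sentTerm (full.getD j ' ') = true ∧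
            full.getD (j + 1) ' ' = ' ' ∧ PySem.Chars.isupper (full.getD (j + 2) ' ') = true) ↔
            (j + 2 < full.length ∧ full.getD (j + 1) ' ' = ' ' ∧
             PySem.Chars.isupper (full.getD (j + 2) ' ') = true) := by
          constructor
          · rintro ⟨h1, -, h3, h4⟩; exact ⟨by omega, h3, h4⟩
          · rintro ⟨h1, h3, h4⟩; exact ⟨by omega, hterm, h3, h4⟩
        rw [if_neg hj1, if_neg hj1, if_congr hcond rfl rfl]
        split_ifs with hc
        · rfl
        · exact ih (j + 1) (by omega) (by omega)

-- ===== VERDICT (by name: the statement is the Claim_ definition above) =====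
theorem find_sentence_end_spec : Claim_equal_find_sentence_end := by
  intro s _
  unfold Spec_find_sentence_end find_sentence_end find_sentence_end_alt
  exact main_eq_aux s.toList (s.toList.length + 1) 0 (by omega) (by omega)
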